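-- pv_equiv track=rewrite | github.com/bu119/Algorithm | 프로그래머스/3/92344. 파괴되지 않은 건물/파괴되지 않은 건물.py | solution
-- ===== SOURCE A (Python) =====
-- def solution(board, skill):
--     n = len(board)
--     m = len(board[0])
--
--     # 내구도 누적합용 배열 (경계+1 표기를 위해 +1 크기)
--     effect = [[0]*(m+1) for _ in range(n+1)]
--
--     # 내구도가 받는 영향 저장
--     for t, r1, c1, r2, c2, degree in skill:
--         # 적이 공격하면 degree 만큼 내구도 감소
--         if t == 1:
--             degree = -degree
--         # 1) 시작 위치에 degree 저장 (영향 시작점)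
--         effect[r1][c1] += degree
--         # 2) 끝 열 다음 칸에 -degree 저장 (가로 누적합 시 [c1..c2]만 유지)
--         effect[r1][c2 + 1] -= degree
--         # 3) 끝 행 다음 칸에 -degree 저장 (세로 누적합 시 [r1..r2]만 유지)
--         effect[r2 + 1][c1] -= degree
--         # 4) 대각선 모서리에 +degree 저장 (중복 상쇄를 보정)
--         effect[r2 + 1][c2 + 1] += degree
--
--     # 좌->우 누적합
--     for i in range(n):
--         for j in range(1, m):
--             effect[i][j] += effect[i][j-1]
--
--     # 상->하 누적합
--     for j in range(m):
--         for i in range(1, n):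
--             effect[i][j] += effect[i-1][j]
--
--     # 최종 내구도 > 0 개수 저장
--     answer = 0
--     # 건물 내구도와 누적 영향력 계산 (기존 배열과 합)
--     for i in range(n):
--         for j in range(m):
--             # 최종 내구도 > 0 개수 세기
--             if board[i][j] + effect[i][j] > 0:
--                 answer += 1
--
--     return answer
-- ===== SOURCE B (Python) =====
-- def solution(board, skill):
--     m = len(board[0])
--     answer = 0
--     for i in range(len(board)):
--         for j in range(m):
--             total = board[i][j]
--             for t, r1, c1, r2, c2, degree in skill:
--                 if r1 <= i <= r2 and c1 <= j <= c2:
--                     total += -degree if t == 1 else degree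
--             if total > 0:
--                 answer += 1
--     return answer
-- ===== Notes on version B (the rewrite author's own statement) =====
-- stated objective: simpler
-- what changed: Replaces the 2D difference-array + two prefix-sum passes and the mutable (n+1)x(m+1) effect grid with a direct per-cell scan that sums, for each building, the signed degrees of the skill rectangles covering it, and counts cells whose total is positive; no auxiliary grid and no mutation.
-- outside the precondition, e.g. on solution([[0], [3], [0]], [[0, 2, 0, 0, 0, 5]]): A returns 0, B returns 1; on solution([[1]], [[1, -1, -1, -1, -1, 1]]): A returns 0, B returns 1
import Mathlib
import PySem

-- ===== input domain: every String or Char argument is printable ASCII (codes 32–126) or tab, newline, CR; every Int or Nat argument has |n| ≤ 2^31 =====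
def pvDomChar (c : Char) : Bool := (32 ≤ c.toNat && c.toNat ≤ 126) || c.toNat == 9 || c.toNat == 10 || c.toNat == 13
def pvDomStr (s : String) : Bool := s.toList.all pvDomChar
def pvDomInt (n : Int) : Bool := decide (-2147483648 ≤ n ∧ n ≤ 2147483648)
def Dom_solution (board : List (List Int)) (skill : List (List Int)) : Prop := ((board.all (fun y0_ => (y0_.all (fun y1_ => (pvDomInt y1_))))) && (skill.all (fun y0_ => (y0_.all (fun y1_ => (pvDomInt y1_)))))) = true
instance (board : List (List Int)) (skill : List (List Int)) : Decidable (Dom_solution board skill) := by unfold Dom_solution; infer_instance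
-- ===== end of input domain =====

set_option maxRecDepth 4000


-- B replaces A's 2D difference-array + two prefix-sum passes over a mutable (n+1)x(m+1) grid
-- with a direct per-cell scan summing the signed degrees of the rectangles covering each cell.

-- ===== PORT A =====
-- effect[i][j]  (Python read; under Pre_ every read index is nonnegative and in range, where pyGetD is exact)
def pvGet2 (g : List (List Int)) (i j : Int) : Int :=
  PySem.List.pyGetD (PySem.List.pyGetD g i []) j 0

-- effect[i][j] += v  (Python list assignment; under Pre_ every index is nonnegative and in range, where pySetD is exact)
def pvUpd (g : List (List Int)) (i j v : Int) : List (List Int) :=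
  PySem.List.pySetD g i
    (PySem.List.pySetD (PySem.List.pyGetD g i []) j (pvGet2 g i j + v))

-- one iteration of A's 'for t, r1, c1, r2, c2, degree in skill' loop (Pre_ guarantees arity 6, so pyGetD is exact)
def pvSkillStep (eff : List (List Int)) (s : List Int) : List (List Int) :=
  let t := PySem.List.pyGetD s 0 0
  let r1 := PySem.List.pyGetD s 1 0
  let c1 := PySem.List.pyGetD s 2 0
  let r2 := PySem.List.pyGetD s 3 0
  let c2 := PySem.List.pyGetD s 4 0
  let degree0 := PySem.List.pyGetD s 5 0
  let degree := if t = 1 then -degree0 else degree0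
  pvUpd (pvUpd (pvUpd (pvUpd eff r1 c1 degree) r1 (c2+1) (-degree)) (r2+1) c1 (-degree)) (r2+1) (c2+1) degree

def solution (board : List (List Int)) (skill : List (List Int)) : Int :=
  let n : Int := (board.length : Int)
  let m : Int := ((PySem.List.pyGetD board 0 []).length : Int)   -- board[0]; Pre_ requires board ≠ []
  let effect0 : List (List Int) := List.replicate (n + 1).toNat (List.replicate (m + 1).toNat (0 : Int))
  let eff1 := skill.foldl pvSkillStep effect0
  let eff2 := (PySem.List.pyRange 0 n 1).foldl (fun eff i =>
      (PySem.List.pyRange 1 m 1).foldl (fun eff j => pvUpd eff i j (pvGet2 eff i (j - 1))) eff) eff1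
  let eff3 := (PySem.List.pyRange 0 m 1).foldl (fun eff j =>
      (PySem.List.pyRange 1 n 1).foldl (fun eff i => pvUpd eff i j (pvGet2 eff (i - 1) j)) eff) eff2
  (PySem.List.pyRange 0 n 1).foldl (fun acc i =>
      (PySem.List.pyRange 0 m 1).foldl (fun acc j =>
        if pvGet2 board i j + pvGet2 eff3 i j > 0 then acc + 1 else acc) acc) 0

-- ===== PORT B =====
-- B's inner skill loop body: add the signed degree if the rectangle of s covers cell (i, j)
def pvCellStep (i j : Int) (total : Int) (s : List Int) : Int :=
  let t := PySem.List.pyGetD s 0 0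
  let r1 := PySem.List.pyGetD s 1 0
  let c1 := PySem.List.pyGetD s 2 0
  let r2 := PySem.List.pyGetD s 3 0
  let c2 := PySem.List.pyGetD s 4 0
  let degree := PySem.List.pyGetD s 5 0
  if r1 ≤ i ∧ i ≤ r2 ∧ c1 ≤ j ∧ j ≤ c2 then
    total + (if t = 1 then -degree else degree)
  else total

def solution_alt (board : List (List Int)) (skill : List (List Int)) : Int :=
  let m : Int := ((PySem.List.pyGetD board 0 []).length : Int)
  (PySem.List.pyRange 0 (board.length : Int) 1).foldl (fun answer i =>
    (PySem.List.pyRange 0 m 1).foldl (fun answer j =>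
      let total := skill.foldl (pvCellStep i j)
        (PySem.List.pyGetD (PySem.List.pyGetD board i []) j 0)
      if total > 0 then answer + 1 else answer) answer) 0

-- ===== PRECONDITION & SPEC =====
-- Pre_ excludes inputs on which A raises (empty board, a board row shorter than row 0, a skill row
-- without exactly 6 entries, rectangle coordinates past the effect grid) and skill rows with negative
-- or inverted rectangle coordinates, on which A still returns but its value is an accident of
-- Python's negative-index wraparound / of running the difference-array trick on an inverted rectangle.
def Pre_solution (board : List (List Int)) (skill : List (List Int)) : Prop :=
  board ≠ [] ∧
  (∀ row ∈ board, (board.headD []).length ≤ row.length) ∧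
  (∀ s ∈ skill, s.length = 6 ∧
    0 ≤ s.getD 1 0 ∧ s.getD 1 0 ≤ s.getD 3 0 ∧ s.getD 3 0 < (board.length : Int) ∧
    0 ≤ s.getD 2 0 ∧ s.getD 2 0 ≤ s.getD 4 0 ∧ s.getD 4 0 < ((board.headD []).length : Int))
instance (board : List (List Int)) (skill : List (List Int)) : Decidable (Pre_solution board skill) := by
  unfold Pre_solution; infer_instance

def pvWitness_solution : List (List Int) × List (List Int) := ([[1]], [[1, 0, 0, 0, 0, 1]])

def Spec_solution (board : List (List Int)) (skill : List (List Int)) (out : Int) : Prop := out = solution_alt board skill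
instance (board : List (List Int)) (skill : List (List Int)) (out : Int) : Decidable (Spec_solution board skill out) := by unfold Spec_solution; infer_instance

-- ===== CLAIM (what is proved, stated in full; the proofs are below) =====
def Claim_equal_solution : Prop := ∀ (board : List (List Int)) (skill : List (List Int)), Dom_solution board skill → Pre_solution board skill → Spec_solution board skill (solution board skill)

-- ===== LEMMAS AND PROOFS =====

-- Nat-indexed read of a grid
def g2 (g : List (List Int)) (i j : Nat) : Int := (g.getD i []).getD j 0

-- uniform shape
def pvShape (g : List (List Int)) (R C : Nat) : Prop := g.length = R ∧ ∀ r ∈ g, r.length = C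

-- per-skill-row signed degree and the two 1D difference indicators
def pvD (s : List Int) : Int := if s.getD 0 0 = 1 then -(s.getD 5 0) else s.getD 5 0
def pvA (s : List Int) (i : Nat) : Int :=
  (if (i : Int) = s.getD 1 0 then 1 else 0) - (if (i : Int) = s.getD 3 0 + 1 then 1 else 0)
def pvB (s : List Int) (j : Nat) : Int :=
  (if (j : Int) = s.getD 2 0 then 1 else 0) - (if (j : Int) = s.getD 4 0 + 1 then 1 else 0)

-- a skill row admitted by Pre_, for a grid with n+1 rows and m+1 columns
def pvOk (s : List Int) (n m : Nat) : Prop :=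
  s.length = 6 ∧ 0 ≤ s.getD 1 0 ∧ s.getD 1 0 ≤ s.getD 3 0 ∧ s.getD 3 0 < (n : Int) ∧
  0 ≤ s.getD 2 0 ∧ s.getD 2 0 ≤ s.getD 4 0 ∧ s.getD 4 0 < (m : Int)

theorem getD_set' (l : List Int) (b : Nat) (w : Int) (j : Nat) :
    (l.set b w).getD j 0 = if j = b ∧ b < l.length then w else l.getD j 0 := by
  simp [List.getD, List.getElem?_set]
  split_ifs with h1 h2 h3 <;> simp_all

theorem getD_set_row (g : List (List Int)) (a : Nat) (row : List Int) (i : Nat) :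
    (g.set a row).getD i [] = if i = a ∧ a < g.length then row else g.getD i [] := by
  simp [List.getD, List.getElem?_set]
  split_ifs with h1 h2 h3 <;> simp_all

theorem pvGet2_natCast (g : List (List Int)) (i j : Nat) : pvGet2 g i j = g2 g i j := by
  simp [pvGet2, g2, PySem.List.pyGetD_natCast]

theorem pvUpd_natCast (g : List (List Int)) (a b : Nat) (v : Int) :
    pvUpd g a b v = g.set a ((g.getD a []).set b (g2 g a b + v)) := by
  simp [pvUpd, pvGet2_natCast, PySem.List.pyGetD_natCast, PySem.List.pySetD_natCast]

theorem g2_pvUpd (g : List (List Int)) {C : Nat} (hrow : ∀ r ∈ g, r.length = C)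
    (a b : Nat) (ha : a < g.length) (hb : b < C) (v : Int) (i j : Nat) :
    g2 (pvUpd g a b v) i j = if i = a ∧ j = b then g2 g i j + v else g2 g i j := by
  have hlen : (g.getD a []).length = C := by
    have : g.getD a [] ∈ g := by
      rw [List.getD_eq_getElem _ _ ha]; exact List.getElem_mem ha
    exact hrow _ this
  rw [pvUpd_natCast]
  unfold g2
  by_cases hia : i = a
  · subst hia
    rw [getD_set_row, if_pos ⟨rfl, ha⟩, getD_set', hlen]
    by_cases hjb : j = b
    · subst hjb
      rw [if_pos ⟨rfl, hb⟩, if_pos ⟨rfl, rfl⟩]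
    · rw [if_neg (by tauto), if_neg (by tauto)]
  · rw [getD_set_row, if_neg (by tauto), if_neg (by tauto)]

theorem pvShape_pvUpd {g : List (List Int)} {R C : Nat} (hs : pvShape g R C)
    (a b : Nat) (v : Int) : pvShape (pvUpd g a b v) R C := by
  obtain ⟨h1, h2⟩ := hs
  rw [pvUpd_natCast]
  refine ⟨by simpa using h1, ?_⟩
  intro r hr
  rcases List.mem_or_eq_of_mem_set hr with h | h
  · exact h2 _ h
  · subst h
    by_cases ha : a < g.length
    · have : g.getD a [] ∈ g := by
        rw [List.getD_eq_getElem _ _ ha]; exact List.getElem_mem ha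
      rw [List.getD_eq_getElem _ _ ha] at *
      simpa [List.length_set] using h2 _ this
    · rw [List.set_eq_of_length_le (by omega)] at hr
      exact h2 _ hr

theorem ind_alg (x d : Int) (p1 p2 q1 q2 : Prop) [Decidable p1] [Decidable p2] [Decidable q1] [Decidable q2]
    (hp : ¬(p1 ∧ p2)) (hq : ¬(q1 ∧ q2)) :
    (if p2 ∧ q2 then
        (if p2 ∧ q1 then
            (if p1 ∧ q2 then (if p1 ∧ q1 then x + d else x) + -d else (if p1 ∧ q1 then x + d else x)) + -d
          else
            (if p1 ∧ q2 then (if p1 ∧ q1 then x + d else x) + -d else (if p1 ∧ q1 then x + d else x))) + d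
      else
        (if p2 ∧ q1 then
            (if p1 ∧ q2 then (if p1 ∧ q1 then x + d else x) + -d else (if p1 ∧ q1 then x + d else x)) + -d
          else
            (if p1 ∧ q2 then (if p1 ∧ q1 then x + d else x) + -d else (if p1 ∧ q1 then x + d else x)))) =
      x + d * ((if p1 then 1 else 0) - (if p2 then 1 else 0)) * ((if q1 then 1 else 0) - (if q2 then 1 else 0)) := by
  by_cases h1 : p1 <;> by_cases h2 : p2 <;> by_cases h3 : q1 <;> by_cases h4 : q2 <;> simp_all

theorem g2_pvSkillStep {n m : Nat} (g : List (List Int)) (hs : pvShape g (n+1) (m+1))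
    (s : List Int) (hok : pvOk s n m) (i j : Nat) :
    g2 (pvSkillStep g s) i j = g2 g i j + pvD s * pvA s i * pvB s j := by
  obtain ⟨hlen6, h1, h2, h3, h4, h5, h6⟩ := hok
  obtain ⟨hgl, hgr⟩ := hs
  set r1 := s.getD 1 0 with hr1
  set c1 := s.getD 2 0 with hc1
  set r2 := s.getD 3 0 with hr2
  set c2 := s.getD 4 0 with hc2
  have er1 : r1 = ((r1.toNat : Nat) : Int) := (Int.toNat_of_nonneg h1).symm
  have ec1 : c1 = ((c1.toNat : Nat) : Int) := (Int.toNat_of_nonneg h4).symm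
  have er2 : r2 + 1 = (((r2+1).toNat : Nat) : Int) := (Int.toNat_of_nonneg (by omega)).symm
  have ec2 : c2 + 1 = (((c2+1).toNat : Nat) : Int) := (Int.toNat_of_nonneg (by omega)).symm
  unfold pvSkillStep
  simp only [PySem.List.pyGetD_ofNat']
  rw [← hr1, ← hc1, ← hr2, ← hc2, er1, ec1, er2, ec2]
  have hshape : ∀ (g' : List (List Int)), pvShape g' (n+1) (m+1) → True := fun _ _ => trivial
  -- shapes after each update
  have hs0 : pvShape g (n+1) (m+1) := ⟨hgl, hgr⟩
  have hs1 := pvShape_pvUpd hs0 r1.toNat c1.toNat (if s.getD 0 0 = 1 then -(s.getD 5 0) else s.getD 5 0)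
  have hs2 := pvShape_pvUpd hs1 r1.toNat (c2+1).toNat (-(if s.getD 0 0 = 1 then -(s.getD 5 0) else s.getD 5 0))
  have hs3 := pvShape_pvUpd hs2 (r2+1).toNat c1.toNat (-(if s.getD 0 0 = 1 then -(s.getD 5 0) else s.getD 5 0))
  have hbr1 : r1.toNat < n + 1 := by omega
  have hbr2 : (r2+1).toNat < n + 1 := by omega
  have hbc1 : c1.toNat < m + 1 := by omega
  have hbc2 : (c2+1).toNat < m + 1 := by omega
  rw [g2_pvUpd _ hs3.2 _ _ (by rw [hs3.1]; exact hbr2) hbc2,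
      g2_pvUpd _ hs2.2 _ _ (by rw [hs2.1]; exact hbr2) hbc1,
      g2_pvUpd _ hs1.2 _ _ (by rw [hs1.1]; exact hbr1) hbc2,
      g2_pvUpd _ hs0.2 _ _ (by rw [hgl]; exact hbr1) hbc1]
  unfold pvD pvA pvB
  rw [← hr1, ← hc1, ← hr2, ← hc2, er1, ec1, er2, ec2]
  simp only [Nat.cast_inj]
  have hrne : r1.toNat ≠ (r2+1).toNat := by omega
  have hcne : c1.toNat ≠ (c2+1).toNat := by omega
  exact ind_alg _ _ _ _ _ _ (by omega) (by omega)

theorem pvShape_pvSkillStep {n m : Nat} {g : List (List Int)} (hs : pvShape g (n+1) (m+1))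
    (s : List Int) (hok : pvOk s n m) : pvShape (pvSkillStep g s) (n+1) (m+1) := by
  obtain ⟨hlen6, h1, h2, h3, h4, h5, h6⟩ := hok
  set r1 := s.getD 1 0 with hr1
  set c1 := s.getD 2 0 with hc1
  set r2 := s.getD 3 0 with hr2
  set c2 := s.getD 4 0 with hc2
  have er1 : r1 = ((r1.toNat : Nat) : Int) := (Int.toNat_of_nonneg h1).symm
  have ec1 : c1 = ((c1.toNat : Nat) : Int) := (Int.toNat_of_nonneg h4).symm
  have er2 : r2 + 1 = (((r2+1).toNat : Nat) : Int) := (Int.toNat_of_nonneg (by omega)).symm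
  have ec2 : c2 + 1 = (((c2+1).toNat : Nat) : Int) := (Int.toNat_of_nonneg (by omega)).symm
  unfold pvSkillStep
  simp only [PySem.List.pyGetD_ofNat']
  rw [← hr1, ← hc1, ← hr2, ← hc2, er1, ec1, er2, ec2]
  exact pvShape_pvUpd (pvShape_pvUpd (pvShape_pvUpd (pvShape_pvUpd hs _ _ _) _ _ _) _ _ _) _ _ _

theorem g2_foldl_skill {n m : Nat} (sk : List (List Int)) (g : List (List Int))
    (hs : pvShape g (n+1) (m+1)) (hok : ∀ s ∈ sk, pvOk s n m) (i j : Nat) :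
    g2 (sk.foldl pvSkillStep g) i j
      = g2 g i j + (sk.map (fun s => pvD s * pvA s i * pvB s j)).sum := by
  induction sk generalizing g with
  | nil => simp
  | cons s tl ih =>
    simp only [List.foldl_cons, List.map_cons, List.sum_cons]
    rw [ih _ (pvShape_pvSkillStep hs s (hok s (by simp))) (fun x hx => hok x (by simp [hx])),
        g2_pvSkillStep g hs s (hok s (by simp))]
    ring

theorem pvShape_foldl_skill {n m : Nat} (sk : List (List Int)) (g : List (List Int))
    (hs : pvShape g (n+1) (m+1)) (hok : ∀ s ∈ sk, pvOk s n m) :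
    pvShape (sk.foldl pvSkillStep g) (n+1) (m+1) := by
  induction sk generalizing g with
  | nil => simpa
  | cons s tl ih =>
    exact ih _ (pvShape_pvSkillStep hs s (hok s (by simp))) (fun x hx => hok x (by simp [hx]))

def rowFold (i : Nat) (k : Nat) (g : List (List Int)) : List (List Int) :=
  ((List.range k).map (fun t : Nat => ((1 : Int) + t))).foldl
    (fun g j => pvUpd g (i : Int) j (pvGet2 g (i : Int) (j - 1))) g

theorem rowFold_succ (i k : Nat) (g : List (List Int)) :
    rowFold i (k+1) g
      = pvUpd (rowFold i k g) (i : Int) ((1 : Int) + k)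
          (pvGet2 (rowFold i k g) (i : Int) (((1 : Int) + k) - 1)) := by
  unfold rowFold
  rw [List.range_succ, List.map_append, List.foldl_append]
  rfl

theorem rowFold_spec {n m : Nat} (i : Nat) (hi : i < n + 1) (k : Nat) (hk : k ≤ m)
    (g : List (List Int)) (hs : pvShape g (n+1) (m+1)) :
    pvShape (rowFold i k g) (n+1) (m+1) ∧
    ∀ i' j' : Nat, g2 (rowFold i k g) i' j' =
      if i' = i ∧ j' ≤ k then ∑ t ∈ Finset.range (j'+1), g2 g i t else g2 g i' j' := by
  induction k with
  | zero =>
    refine ⟨hs, ?_⟩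
    intro i' j'
    unfold rowFold
    simp only [List.range_zero, List.map_nil, List.foldl_nil]
    split_ifs with h
    · obtain ⟨h1, h2⟩ := h
      have : j' = 0 := by omega
      subst this; subst h1
      simp
    · rfl
  | succ k ih =>
    obtain ⟨ihs, ihc⟩ := ih (by omega)
    have hcast1 : ((1 : Int) + k) = ((k+1 : Nat) : Int) := by push_cast; ring
    have hcast2 : (((k+1 : Nat) : Int) - 1) = ((k : Nat) : Int) := by push_cast; ring
    have hstep : rowFold i (k+1) g
        = pvUpd (rowFold i k g) (i : Int) ((k+1 : Nat) : Int) (g2 (rowFold i k g) i k) := by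
      rw [rowFold_succ, hcast1, hcast2, pvGet2_natCast]
    constructor
    · rw [hstep]; exact pvShape_pvUpd ihs _ _ _
    · intro i' j'
      rw [hstep, g2_pvUpd _ ihs.2 i (k+1) (by rw [ihs.1]; omega) (by omega)]
      rw [ihc i k, ihc i' j']
      by_cases hii : i' = i
      · subst hii
        by_cases hj1 : j' = k + 1
        · subst hj1
          rw [if_pos ⟨rfl, rfl⟩, if_neg (by omega), if_pos ⟨rfl, le_refl _⟩,
              if_pos ⟨rfl, by omega⟩, Finset.sum_range_succ]
          rw [Finset.sum_range_succ, Finset.sum_range_succ]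
          ring
        · by_cases hj2 : j' ≤ k
          · rw [if_neg (by omega), if_pos ⟨rfl, hj2⟩, if_pos ⟨rfl, by omega⟩]
          · rw [if_neg (by omega), if_neg (by omega), if_neg (by omega)]
      · rw [if_neg (by tauto), if_neg (by tauto), if_neg (by tauto)]

def rowsFold (m K : Nat) (g : List (List Int)) : List (List Int) :=
  ((List.range K).map (fun t : Nat => (t : Int))).foldl
    (fun g i => (PySem.List.pyRange 1 (m : Int) 1).foldl
      (fun g j => pvUpd g i j (pvGet2 g i (j - 1))) g) g

theorem rowsFold_inner (m : Nat) (i : Nat) (g : List (List Int)) :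
    (PySem.List.pyRange 1 (m : Int) 1).foldl
      (fun g j => pvUpd g (i : Nat) j (pvGet2 g (i : Nat) (j - 1))) g = rowFold i (m-1) g := by
  rw [PySem.List.pyRange_one]
  unfold rowFold
  have : ((m : Int) - 1).toNat = m - 1 := by omega
  rw [this]

theorem rowsFold_spec {n m : Nat} (K : Nat) (hK : K ≤ n + 1) (g : List (List Int))
    (hs : pvShape g (n+1) (m+1)) :
    pvShape (rowsFold m K g) (n+1) (m+1) ∧
    ∀ i' j' : Nat, g2 (rowsFold m K g) i' j' =
      if i' < K ∧ j' ≤ m - 1 then ∑ t ∈ Finset.range (j'+1), g2 g i' t else g2 g i' j' := by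
  induction K with
  | zero =>
    refine ⟨hs, ?_⟩
    intro i' j'
    simp [rowsFold]
  | succ K ih =>
    obtain ⟨ihs, ihc⟩ := ih (by omega)
    have hstep : rowsFold m (K+1) g = rowFold K (m-1) (rowsFold m K g) := by
      unfold rowsFold
      rw [List.range_succ, List.map_append, List.foldl_append]
      simp only [List.map_cons, List.map_nil, List.foldl_cons, List.foldl_nil]
      exact rowsFold_inner m K _
    obtain ⟨rs, rc⟩ := rowFold_spec (n := n) (m := m) K (by omega) (m-1) (by omega) _ ihs
    rw [hstep]
    refine ⟨rs, ?_⟩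
    intro i' j'
    rw [rc i' j']
    by_cases hii : i' = K
    · subst hii
      by_cases hj : j' ≤ m - 1
      · rw [if_pos ⟨rfl, hj⟩, if_pos ⟨by omega, hj⟩]
        exact Finset.sum_congr rfl (fun t _ => by rw [ihc, if_neg (by omega)])
      · rw [if_neg (by tauto), if_neg (by tauto), ihc, if_neg (by omega)]
    · rw [if_neg (by tauto), ihc]
      by_cases h2 : i' < K ∧ j' ≤ m - 1
      · rw [if_pos h2, if_pos ⟨by omega, h2.2⟩]
      · rw [if_neg h2, if_neg (by omega)]

def colFold (j : Nat) (k : Nat) (g : List (List Int)) : List (List Int) :=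
  ((List.range k).map (fun t : Nat => ((1 : Int) + t))).foldl
    (fun g i => pvUpd g i (j : Int) (pvGet2 g (i - 1) (j : Int))) g

theorem colFold_succ (j k : Nat) (g : List (List Int)) :
    colFold j (k+1) g
      = pvUpd (colFold j k g) ((1 : Int) + k) (j : Int)
          (pvGet2 (colFold j k g) (((1 : Int) + k) - 1) (j : Int)) := by
  unfold colFold
  rw [List.range_succ, List.map_append, List.foldl_append]
  rfl

theorem colFold_spec {n m : Nat} (j : Nat) (hj : j < m + 1) (k : Nat) (hk : k ≤ n)
    (g : List (List Int)) (hs : pvShape g (n+1) (m+1)) :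
    pvShape (colFold j k g) (n+1) (m+1) ∧
    ∀ i' j' : Nat, g2 (colFold j k g) i' j' =
      if j' = j ∧ i' ≤ k then ∑ t ∈ Finset.range (i'+1), g2 g t j else g2 g i' j' := by
  induction k with
  | zero =>
    refine ⟨hs, ?_⟩
    intro i' j'
    unfold colFold
    simp only [List.range_zero, List.map_nil, List.foldl_nil]
    split_ifs with h
    · obtain ⟨h1, h2⟩ := h
      have : i' = 0 := by omega
      subst this; subst h1
      simp
    · rfl
  | succ k ih =>
    obtain ⟨ihs, ihc⟩ := ih (by omega)
    have hcast1 : ((1 : Int) + k) = ((k+1 : Nat) : Int) := by push_cast; ring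
    have hcast2 : (((k+1 : Nat) : Int) - 1) = ((k : Nat) : Int) := by push_cast; ring
    have hstep : colFold j (k+1) g
        = pvUpd (colFold j k g) ((k+1 : Nat) : Int) (j : Int) (g2 (colFold j k g) k j) := by
      rw [colFold_succ, hcast1, hcast2, pvGet2_natCast]
    constructor
    · rw [hstep]; exact pvShape_pvUpd ihs _ _ _
    · intro i' j'
      rw [hstep, g2_pvUpd _ ihs.2 (k+1) j (by rw [ihs.1]; omega) (by omega)]
      rw [ihc k j, ihc i' j']
      by_cases hjj : j' = j
      · subst hjj
        by_cases hi1 : i' = k + 1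
        · subst hi1
          rw [if_pos ⟨rfl, rfl⟩, if_neg (by omega), if_pos ⟨rfl, le_refl _⟩,
              if_pos ⟨rfl, by omega⟩, Finset.sum_range_succ]
          rw [Finset.sum_range_succ, Finset.sum_range_succ]
          ring
        · by_cases hi2 : i' ≤ k
          · rw [if_neg (by omega), if_pos ⟨rfl, hi2⟩, if_pos ⟨rfl, by omega⟩]
          · rw [if_neg (by omega), if_neg (by omega), if_neg (by omega)]
      · rw [if_neg (by tauto), if_neg (by tauto), if_neg (by tauto)]

def colsFold (n K : Nat) (g : List (List Int)) : List (List Int) :=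
  ((List.range K).map (fun t : Nat => (t : Int))).foldl
    (fun g j => (PySem.List.pyRange 1 (n : Int) 1).foldl
      (fun g i => pvUpd g i j (pvGet2 g (i - 1) j)) g) g

theorem colsFold_inner (n : Nat) (j : Nat) (g : List (List Int)) :
    (PySem.List.pyRange 1 (n : Int) 1).foldl
      (fun g i => pvUpd g i (j : Nat) (pvGet2 g (i - 1) (j : Nat))) g = colFold j (n-1) g := by
  rw [PySem.List.pyRange_one]
  unfold colFold
  have : ((n : Int) - 1).toNat = n - 1 := by omega
  rw [this]

theorem colsFold_spec {n m : Nat} (K : Nat) (hK : K ≤ m + 1) (g : List (List Int))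
    (hs : pvShape g (n+1) (m+1)) :
    pvShape (colsFold n K g) (n+1) (m+1) ∧
    ∀ i' j' : Nat, g2 (colsFold n K g) i' j' =
      if j' < K ∧ i' ≤ n - 1 then ∑ t ∈ Finset.range (i'+1), g2 g t j' else g2 g i' j' := by
  induction K with
  | zero =>
    refine ⟨hs, ?_⟩
    intro i' j'
    simp [colsFold]
  | succ K ih =>
    obtain ⟨ihs, ihc⟩ := ih (by omega)
    have hstep : colsFold n (K+1) g = colFold K (n-1) (colsFold n K g) := by
      unfold colsFold
      rw [List.range_succ, List.map_append, List.foldl_append]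
      simp only [List.map_cons, List.map_nil, List.foldl_cons, List.foldl_nil]
      exact colsFold_inner n K _
    obtain ⟨rs, rc⟩ := colFold_spec (n := n) (m := m) K (by omega) (n-1) (by omega) _ ihs
    rw [hstep]
    refine ⟨rs, ?_⟩
    intro i' j'
    rw [rc i' j']
    by_cases hjj : j' = K
    · subst hjj
      by_cases hi : i' ≤ n - 1
      · rw [if_pos ⟨rfl, hi⟩, if_pos ⟨by omega, hi⟩]
        exact Finset.sum_congr rfl (fun t _ => by rw [ihc, if_neg (by omega)])
      · rw [if_neg (by tauto), if_neg (by tauto), ihc, if_neg (by omega)]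
    · rw [if_neg (by tauto), ihc]
      by_cases h2 : j' < K ∧ i' ≤ n - 1
      · rw [if_pos h2, if_pos ⟨by omega, h2.2⟩]
      · rw [if_neg h2, if_neg (by omega)]

theorem g2_zero (R C : Nat) (i j : Nat) :
    g2 (List.replicate R (List.replicate C (0 : Int))) i j = 0 := by
  unfold g2
  by_cases h : i < R
  · simp only [List.getD, List.getElem?_replicate, if_pos h, Option.getD_some]
    by_cases h2 : j < C <;> simp [h2]
  · simp [List.getD, h]

theorem pvShape_replicate (R C : Nat) :
    pvShape (List.replicate R (List.replicate C (0 : Int))) R C := by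
  constructor
  · simp
  · intro r hr
    rw [List.eq_of_mem_replicate hr]
    simp

theorem sum_ind (k : Nat) (r : Int) :
    ∑ t ∈ Finset.range k, (if (t : Int) = r then (1 : Int) else 0)
      = if 0 ≤ r ∧ r < (k : Int) then 1 else 0 := by
  induction k with
  | zero => simp
  | succ k ih =>
    rw [Finset.sum_range_succ, ih]
    split_ifs <;> push_cast at * <;> omega

theorem sum_swap_list (k : Nat) (l : List (List Int)) (f : Nat → List Int → Int) :
    ∑ t ∈ Finset.range k, (l.map (f t)).sum
      = (l.map (fun s => ∑ t ∈ Finset.range k, f t s)).sum := by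
  induction l with
  | nil => simp
  | cons s tl ih => simp [Finset.sum_add_distrib, ih]

theorem contrib_eq {n m : Nat} (s : List Int) (hok : pvOk s n m) (i j : Nat) :
    ∑ t ∈ Finset.range (i+1), ∑ u ∈ Finset.range (j+1), pvD s * pvA s t * pvB s u
      = if s.getD 1 0 ≤ (i : Int) ∧ (i : Int) ≤ s.getD 3 0 ∧ s.getD 2 0 ≤ (j : Int) ∧ (j : Int) ≤ s.getD 4 0
        then pvD s else 0 := by
  obtain ⟨hlen6, h1, h2, h3, h4, h5, h6⟩ := hok
  have hB : ∑ u ∈ Finset.range (j+1), pvB s u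
      = (if 0 ≤ s.getD 2 0 ∧ s.getD 2 0 < ((j+1 : Nat) : Int) then 1 else 0)
        - (if 0 ≤ s.getD 4 0 + 1 ∧ s.getD 4 0 + 1 < ((j+1 : Nat) : Int) then 1 else 0) := by
    unfold pvB
    rw [Finset.sum_sub_distrib, sum_ind, sum_ind]
  have hA : ∑ t ∈ Finset.range (i+1), pvA s t
      = (if 0 ≤ s.getD 1 0 ∧ s.getD 1 0 < ((i+1 : Nat) : Int) then 1 else 0)
        - (if 0 ≤ s.getD 3 0 + 1 ∧ s.getD 3 0 + 1 < ((i+1 : Nat) : Int) then 1 else 0) := by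
    unfold pvA
    rw [Finset.sum_sub_distrib, sum_ind, sum_ind]
  calc ∑ t ∈ Finset.range (i+1), ∑ u ∈ Finset.range (j+1), pvD s * pvA s t * pvB s u
      = ∑ t ∈ Finset.range (i+1), pvD s * pvA s t * ∑ u ∈ Finset.range (j+1), pvB s u := by
        exact Finset.sum_congr rfl (fun t _ => (Finset.mul_sum _ _ _).symm)
    _ = (∑ t ∈ Finset.range (i+1), pvD s * pvA s t) * (∑ u ∈ Finset.range (j+1), pvB s u) := by
        rw [Finset.sum_mul]
    _ = pvD s * (∑ t ∈ Finset.range (i+1), pvA s t) * (∑ u ∈ Finset.range (j+1), pvB s u) := by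
        rw [← Finset.mul_sum]
    _ = _ := by
        rw [hA, hB]
        push_cast
        split_ifs <;> omega

theorem foldl_cellStep (sk : List (List Int)) (i j : Int) (base : Int) :
    sk.foldl (pvCellStep i j) base
      = base + (sk.map (fun s =>
          if s.getD 1 0 ≤ i ∧ i ≤ s.getD 3 0 ∧ s.getD 2 0 ≤ j ∧ j ≤ s.getD 4 0
          then pvD s else 0)).sum := by
  induction sk generalizing base with
  | nil => simp
  | cons s tl ih =>
    simp only [List.foldl_cons, List.map_cons, List.sum_cons]
    rw [ih]
    unfold pvCellStep pvD
    simp only [PySem.List.pyGetD_ofNat']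
    split_ifs <;> ring

theorem effect_final {n m : Nat} (skill : List (List Int)) (hok : ∀ s ∈ skill, pvOk s n m)
    (i j : Nat) (hi : i < n) (hj : j < m) :
    g2 (colsFold n m (rowsFold m n (skill.foldl pvSkillStep
          (List.replicate (n+1) (List.replicate (m+1) (0 : Int)))))) i j
      = (skill.map (fun s =>
          if s.getD 1 0 ≤ (i : Int) ∧ (i : Int) ≤ s.getD 3 0 ∧ s.getD 2 0 ≤ (j : Int) ∧ (j : Int) ≤ s.getD 4 0
          then pvD s else 0)).sum := by
  have hs0 := pvShape_replicate (n+1) (m+1)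
  have hs1 := pvShape_foldl_skill skill _ hs0 hok
  obtain ⟨hs2, hc2⟩ := rowsFold_spec (n := n) (m := m) n (by omega) _ hs1
  obtain ⟨hs3, hc3⟩ := colsFold_spec (n := n) (m := m) m (by omega) _ hs2
  rw [hc3 i j, if_pos ⟨hj, by omega⟩]
  have step1 : ∀ t ∈ Finset.range (i+1),
      g2 (rowsFold m n (skill.foldl pvSkillStep (List.replicate (n+1) (List.replicate (m+1) (0:Int))))) t j
        = ∑ u ∈ Finset.range (j+1), (skill.map (fun s => pvD s * pvA s t * pvB s u)).sum := by
    intro t ht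
    rw [hc2 t j, if_pos ⟨by simp at ht; omega, by omega⟩]
    exact Finset.sum_congr rfl (fun u _ => by
      rw [g2_foldl_skill skill _ hs0 hok, g2_zero, zero_add])
  rw [Finset.sum_congr rfl step1]
  calc ∑ t ∈ Finset.range (i+1), ∑ u ∈ Finset.range (j+1), (skill.map (fun s => pvD s * pvA s t * pvB s u)).sum
      = ∑ t ∈ Finset.range (i+1), (skill.map (fun s => ∑ u ∈ Finset.range (j+1), pvD s * pvA s t * pvB s u)).sum := by
        exact Finset.sum_congr rfl (fun t _ => sum_swap_list _ _ _)
    _ = (skill.map (fun s => ∑ t ∈ Finset.range (i+1), ∑ u ∈ Finset.range (j+1), pvD s * pvA s t * pvB s u)).sum := by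
        exact sum_swap_list _ _ _
    _ = _ := by
        apply congrArg
        apply List.map_congr_left
        intro s hs
        exact contrib_eq s (hok s hs) i j


-- ===== VERDICT (by name: the statement is the Claim_ definition above) =====
theorem headD_eq_getD0 (board : List (List Int)) :
    PySem.List.pyGetD board 0 [] = board.headD [] := by
  rw [PySem.List.pyGetD_zero]
  cases board <;> rfl

theorem solution_spec : Claim_equal_solution := by
  intro board skill _ hpre
  obtain ⟨hne, hrows, hsk⟩ := hpre
  unfold Spec_solution
  simp only [solution, solution_alt]
  rw [headD_eq_getD0]
  have hok : ∀ s ∈ skill, pvOk s board.length (board.headD []).length := fun s hs => hsk s hs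
  rw [show (((board.length : Int)) + 1).toNat = board.length + 1 from by omega,
      show ((((board.headD []).length : Int)) + 1).toNat = (board.headD []).length + 1 from by omega]
  have hrowsfold : ∀ g : List (List Int),
      (PySem.List.pyRange 0 (board.length : Int) 1).foldl (fun eff i =>
        (PySem.List.pyRange 1 ((board.headD []).length : Int) 1).foldl
          (fun eff j => pvUpd eff i j (pvGet2 eff i (j - 1))) eff) g
        = rowsFold (board.headD []).length board.length g := by
    intro g
    unfold rowsFold
    rw [PySem.List.pyRange_zero_natCast]
  have hcolsfold : ∀ g : List (List Int),
      (PySem.List.pyRange 0 ((board.headD []).length : Int) 1).foldl (fun eff j =>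
        (PySem.List.pyRange 1 (board.length : Int) 1).foldl
          (fun eff i => pvUpd eff i j (pvGet2 eff (i - 1) j)) eff) g
        = colsFold board.length (board.headD []).length g := by
    intro g
    unfold colsFold
    rw [PySem.List.pyRange_zero_natCast]
  rw [hrowsfold, hcolsfold]
  apply PySem.List.foldl_congr_mem
  intro acc x hx
  rw [PySem.List.mem_pyRange_one] at hx
  apply PySem.List.foldl_congr_mem
  intro acc2 y hy
  rw [PySem.List.mem_pyRange_one] at hy
  rw [show x = ((x.toNat : Nat) : Int) from by omega, show y = ((y.toNat : Nat) : Int) from by omega,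
      foldl_cellStep, pvGet2_natCast, pvGet2_natCast,
      effect_final skill hok x.toNat y.toNat (by omega) (by omega)]
  simp only [PySem.List.pyGetD_natCast]
  rfl
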